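-- pv_equiv track=rewrite | github.com/nigoshu-roby/openclaw-roby | scripts/roby-orchestrator.py | apply_minutes_llm_profile
-- ===== SOURCE A (Python) =====
-- from typing import Any, Dict, List, Optional, Tuple
--
-- def apply_minutes_llm_profile(env: Dict[str, str]) -> Tuple[str, Dict[str, str]]:
--     profile = (env.get("ROBY_ORCH_MINUTES_LLM_PROFILE", "hybrid") or "hybrid").strip().lower()
--     local_fast = (env.get("ROBY_ORCH_MINUTES_LOCAL_FAST_MODEL", "ollama/llama3.2:3b") or "").strip()
--     local_quality = (env.get("ROBY_ORCH_MINUTES_LOCAL_QUALITY_MODEL", "ollama/qwen2.5:7b") or "").strip()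
--     cloud = (env.get("ROBY_ORCH_MINUTES_CLOUD_MODEL", env.get("MINUTES_GEMINI_MODEL", "google/gemini-3-flash-preview")) or "").strip()
--
--     def _csv(*models: str) -> str:
--         return ",".join([m for m in models if m])
--
--     overrides: Dict[str, str] = {}
--     if profile == "local":
--         overrides = {
--             "MINUTES_REVIEW_MODELS": _csv(local_quality, local_fast, cloud),
--             "MINUTES_TASKS_MODELS": _csv(local_quality, local_fast, cloud),
--             "MINUTES_SUMMARY_MODELS": _csv(local_quality, local_fast, cloud),
--             "MINUTES_COMPACT_MODELS": _csv(local_fast, local_quality, cloud),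
--             "MINUTES_REPAIR_MODELS": _csv(local_quality, local_fast, cloud),
--             "MINUTES_ENRICH_MODELS": _csv(local_fast, local_quality, cloud),
--         }
--     elif profile == "cloud":
--         overrides = {
--             "MINUTES_REVIEW_MODELS": _csv(cloud, local_quality),
--             "MINUTES_TASKS_MODELS": _csv(cloud, local_quality),
--             "MINUTES_SUMMARY_MODELS": _csv(cloud, local_quality),
--             "MINUTES_COMPACT_MODELS": _csv(cloud, local_fast),
--             "MINUTES_REPAIR_MODELS": _csv(cloud, local_quality),
--             "MINUTES_ENRICH_MODELS": _csv(cloud, local_fast),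
--         }
--     else:  # hybrid
--         profile = "hybrid"
--         overrides = {
--             "MINUTES_REVIEW_MODELS": _csv(local_quality, cloud),
--             "MINUTES_TASKS_MODELS": _csv(cloud, local_quality),
--             "MINUTES_SUMMARY_MODELS": _csv(cloud, local_quality),
--             "MINUTES_COMPACT_MODELS": _csv(local_fast, cloud),
--             "MINUTES_REPAIR_MODELS": _csv(cloud, local_quality),
--             "MINUTES_ENRICH_MODELS": _csv(local_fast, cloud),
--         }
--     return profile, overrides
-- ===== SOURCE B (Python) =====
-- # Table-driven: one PROFILES table maps each profile name to its key -> slot-order row;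
-- # build overrides by a single lookup + comprehension instead of three branch-specific dict literals.
-- _PROFILES = {
--     "local": {
--         "MINUTES_REVIEW_MODELS": ("q", "f", "c"),
--         "MINUTES_TASKS_MODELS": ("q", "f", "c"),
--         "MINUTES_SUMMARY_MODELS": ("q", "f", "c"),
--         "MINUTES_COMPACT_MODELS": ("f", "q", "c"),
--         "MINUTES_REPAIR_MODELS": ("q", "f", "c"),
--         "MINUTES_ENRICH_MODELS": ("f", "q", "c"),
--     },
--     "cloud": {
--         "MINUTES_REVIEW_MODELS": ("c", "q"),
--         "MINUTES_TASKS_MODELS": ("c", "q"),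
--         "MINUTES_SUMMARY_MODELS": ("c", "q"),
--         "MINUTES_COMPACT_MODELS": ("c", "f"),
--         "MINUTES_REPAIR_MODELS": ("c", "q"),
--         "MINUTES_ENRICH_MODELS": ("c", "f"),
--     },
--     "hybrid": {
--         "MINUTES_REVIEW_MODELS": ("q", "c"),
--         "MINUTES_TASKS_MODELS": ("c", "q"),
--         "MINUTES_SUMMARY_MODELS": ("c", "q"),
--         "MINUTES_COMPACT_MODELS": ("f", "c"),
--         "MINUTES_REPAIR_MODELS": ("c", "q"),
--         "MINUTES_ENRICH_MODELS": ("f", "c"),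
--     },
-- }
--
-- def apply_minutes_llm_profile(env):
--     profile = (env.get("ROBY_ORCH_MINUTES_LLM_PROFILE", "hybrid") or "hybrid").strip().lower()
--     slots = {
--         "f": (env.get("ROBY_ORCH_MINUTES_LOCAL_FAST_MODEL", "ollama/llama3.2:3b") or "").strip(),
--         "q": (env.get("ROBY_ORCH_MINUTES_LOCAL_QUALITY_MODEL", "ollama/qwen2.5:7b") or "").strip(),
--         "c": (env.get("ROBY_ORCH_MINUTES_CLOUD_MODEL", env.get("MINUTES_GEMINI_MODEL", "google/gemini-3-flash-preview")) or "").strip(),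
--     }
--     row = _PROFILES.get(profile)
--     if row is None:
--         profile, row = "hybrid", _PROFILES["hybrid"]
--     overrides = {
--         key: ",".join(m for s in order if (m := slots[s]))
--         for key, order in row.items()
--     }
--     return profile, overrides
-- ===== Notes on version B (the rewrite author's own statement) =====
-- stated objective: simpler
-- what changed: Replaces A's three branch-specific six-entry dict literals with a single PROFILES table (profile -> key -> slot order) plus one lookup-with-hybrid-fallback and a comprehension that joins the slot values.
import Mathlib
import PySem

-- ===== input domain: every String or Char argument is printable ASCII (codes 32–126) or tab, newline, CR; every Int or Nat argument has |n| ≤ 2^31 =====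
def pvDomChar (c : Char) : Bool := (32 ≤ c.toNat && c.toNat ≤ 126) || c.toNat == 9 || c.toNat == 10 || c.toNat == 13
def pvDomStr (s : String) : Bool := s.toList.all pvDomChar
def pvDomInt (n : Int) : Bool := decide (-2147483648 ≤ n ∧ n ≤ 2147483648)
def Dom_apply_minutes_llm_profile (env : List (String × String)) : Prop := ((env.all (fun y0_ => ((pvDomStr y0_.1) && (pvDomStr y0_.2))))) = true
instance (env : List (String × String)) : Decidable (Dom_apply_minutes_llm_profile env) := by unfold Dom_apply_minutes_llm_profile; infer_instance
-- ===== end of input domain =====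

-- B replaces A's three branch-specific dict literals with one PROFILES table and a single
-- lookup + comprehension (objective: simpler). Equivalence of the return value is proved below.

-- env.get(k, dflt): first-match lookup in the association list (the task's dict convention)
def pvEnvGet (env : List (String × String)) (k dflt : String) : String :=
  match env.find? (fun p => p.1 == k) with
  | some p => p.2
  | none => dflt

-- Python 'x or y' on strings: empty string is falsy
def pvOr (x y : String) : String := if x == "" then y else x

-- ===== PORT A =====
-- _csv(*models): ",".join([m for m in models if m])
def pvCsvA (ms : List String) : String :=
  PySem.Str.join "," (ms.filter (fun m => m != ""))

def apply_minutes_llm_profile (env : List (String × String)) : String × (List (String × String)) :=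
  let profile := PySem.Str.lower (PySem.Str.strip (pvOr (pvEnvGet env "ROBY_ORCH_MINUTES_LLM_PROFILE" "hybrid") "hybrid"))
  let local_fast := PySem.Str.strip (pvOr (pvEnvGet env "ROBY_ORCH_MINUTES_LOCAL_FAST_MODEL" "ollama/llama3.2:3b") "")
  let local_quality := PySem.Str.strip (pvOr (pvEnvGet env "ROBY_ORCH_MINUTES_LOCAL_QUALITY_MODEL" "ollama/qwen2.5:7b") "")
  let cloud := PySem.Str.strip (pvOr (pvEnvGet env "ROBY_ORCH_MINUTES_CLOUD_MODEL" (pvEnvGet env "MINUTES_GEMINI_MODEL" "google/gemini-3-flash-preview")) "")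
  if profile == "local" then
    (profile,
      [("MINUTES_REVIEW_MODELS", pvCsvA [local_quality, local_fast, cloud]),
       ("MINUTES_TASKS_MODELS", pvCsvA [local_quality, local_fast, cloud]),
       ("MINUTES_SUMMARY_MODELS", pvCsvA [local_quality, local_fast, cloud]),
       ("MINUTES_COMPACT_MODELS", pvCsvA [local_fast, local_quality, cloud]),
       ("MINUTES_REPAIR_MODELS", pvCsvA [local_quality, local_fast, cloud]),
       ("MINUTES_ENRICH_MODELS", pvCsvA [local_fast, local_quality, cloud])])
  else if profile == "cloud" then
    (profile,
      [("MINUTES_REVIEW_MODELS", pvCsvA [cloud, local_quality]),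
       ("MINUTES_TASKS_MODELS", pvCsvA [cloud, local_quality]),
       ("MINUTES_SUMMARY_MODELS", pvCsvA [cloud, local_quality]),
       ("MINUTES_COMPACT_MODELS", pvCsvA [cloud, local_fast]),
       ("MINUTES_REPAIR_MODELS", pvCsvA [cloud, local_quality]),
       ("MINUTES_ENRICH_MODELS", pvCsvA [cloud, local_fast])])
  else
    ("hybrid",
      [("MINUTES_REVIEW_MODELS", pvCsvA [local_quality, cloud]),
       ("MINUTES_TASKS_MODELS", pvCsvA [cloud, local_quality]),
       ("MINUTES_SUMMARY_MODELS", pvCsvA [cloud, local_quality]),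
       ("MINUTES_COMPACT_MODELS", pvCsvA [local_fast, cloud]),
       ("MINUTES_REPAIR_MODELS", pvCsvA [cloud, local_quality]),
       ("MINUTES_ENRICH_MODELS", pvCsvA [local_fast, cloud])])

-- ===== PORT B =====
-- the _PROFILES table: profile name -> ordered rows (output key, slot order)
def pvProfiles : List (String × List (String × List String)) :=
  [("local",
     [("MINUTES_REVIEW_MODELS", ["q", "f", "c"]),
      ("MINUTES_TASKS_MODELS", ["q", "f", "c"]),
      ("MINUTES_SUMMARY_MODELS", ["q", "f", "c"]),
      ("MINUTES_COMPACT_MODELS", ["f", "q", "c"]),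
      ("MINUTES_REPAIR_MODELS", ["q", "f", "c"]),
      ("MINUTES_ENRICH_MODELS", ["f", "q", "c"])]),
   ("cloud",
     [("MINUTES_REVIEW_MODELS", ["c", "q"]),
      ("MINUTES_TASKS_MODELS", ["c", "q"]),
      ("MINUTES_SUMMARY_MODELS", ["c", "q"]),
      ("MINUTES_COMPACT_MODELS", ["c", "f"]),
      ("MINUTES_REPAIR_MODELS", ["c", "q"]),
      ("MINUTES_ENRICH_MODELS", ["c", "f"])]),
   ("hybrid",
     [("MINUTES_REVIEW_MODELS", ["q", "c"]),
      ("MINUTES_TASKS_MODELS", ["c", "q"]),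
      ("MINUTES_SUMMARY_MODELS", ["c", "q"]),
      ("MINUTES_COMPACT_MODELS", ["f", "c"]),
      ("MINUTES_REPAIR_MODELS", ["c", "q"]),
      ("MINUTES_ENRICH_MODELS", ["f", "c"])])]

def apply_minutes_llm_profile_alt (env : List (String × String)) : String × (List (String × String)) :=
  let profile := PySem.Str.lower (PySem.Str.strip (pvOr (pvEnvGet env "ROBY_ORCH_MINUTES_LLM_PROFILE" "hybrid") "hybrid"))
  let slots : PySem.Dict String String := PySem.Dict.ofList
    [("f", PySem.Str.strip (pvOr (pvEnvGet env "ROBY_ORCH_MINUTES_LOCAL_FAST_MODEL" "ollama/llama3.2:3b") "")),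
     ("q", PySem.Str.strip (pvOr (pvEnvGet env "ROBY_ORCH_MINUTES_LOCAL_QUALITY_MODEL" "ollama/qwen2.5:7b") "")),
     ("c", PySem.Str.strip (pvOr (pvEnvGet env "ROBY_ORCH_MINUTES_CLOUD_MODEL" (pvEnvGet env "MINUTES_GEMINI_MODEL" "google/gemini-3-flash-preview")) ""))]
  let looked := pvProfiles.find? (fun p : String × List (String × List String) => p.1 == profile)
  let (profile, row) :=
    match looked with
    | some p => (profile, p.2)
    | none => ("hybrid", (pvProfiles.find? (fun p : String × List (String × List String) => p.1 == "hybrid")).elim [] (fun x => x.2))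
  (profile,
   row.map (fun kr : String × List String =>
     (kr.1, PySem.Str.join "," ((kr.2.map (fun s => slots.getD s "")).filter (fun m => m != "")))))

-- ===== PRECONDITION & SPEC =====
def Spec_apply_minutes_llm_profile (env : List (String × String)) (out : String × (List (String × String))) : Prop := out = apply_minutes_llm_profile_alt env
instance (env : List (String × String)) (out : String × (List (String × String))) : Decidable (Spec_apply_minutes_llm_profile env out) := by unfold Spec_apply_minutes_llm_profile; infer_instance

-- ===== CLAIM (what is proved, stated in full; the proofs are below) =====
def Claim_equal_apply_minutes_llm_profile : Prop := ∀ (env : List (String × String)), Dom_apply_minutes_llm_profile env → Spec_apply_minutes_llm_profile env (apply_minutes_llm_profile env)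

-- ===== LEMMAS AND PROOFS =====
-- A's branching result equals B's table-lookup result, for arbitrary normalized strings
theorem pv_core (p f q c : String) :
    (if p == "local" then
      (p,
        [("MINUTES_REVIEW_MODELS", pvCsvA [q, f, c]),
         ("MINUTES_TASKS_MODELS", pvCsvA [q, f, c]),
         ("MINUTES_SUMMARY_MODELS", pvCsvA [q, f, c]),
         ("MINUTES_COMPACT_MODELS", pvCsvA [f, q, c]),
         ("MINUTES_REPAIR_MODELS", pvCsvA [q, f, c]),
         ("MINUTES_ENRICH_MODELS", pvCsvA [f, q, c])])
    else if p == "cloud" then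
      (p,
        [("MINUTES_REVIEW_MODELS", pvCsvA [c, q]),
         ("MINUTES_TASKS_MODELS", pvCsvA [c, q]),
         ("MINUTES_SUMMARY_MODELS", pvCsvA [c, q]),
         ("MINUTES_COMPACT_MODELS", pvCsvA [c, f]),
         ("MINUTES_REPAIR_MODELS", pvCsvA [c, q]),
         ("MINUTES_ENRICH_MODELS", pvCsvA [c, f])])
    else
      ("hybrid",
        [("MINUTES_REVIEW_MODELS", pvCsvA [q, c]),
         ("MINUTES_TASKS_MODELS", pvCsvA [c, q]),
         ("MINUTES_SUMMARY_MODELS", pvCsvA [c, q]),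
         ("MINUTES_COMPACT_MODELS", pvCsvA [f, c]),
         ("MINUTES_REPAIR_MODELS", pvCsvA [c, q]),
         ("MINUTES_ENRICH_MODELS", pvCsvA [f, c])])) =
    (let slots : PySem.Dict String String := PySem.Dict.ofList [("f", f), ("q", q), ("c", c)]
     let looked := pvProfiles.find? (fun x : String × List (String × List String) => x.1 == p)
     let (profile, row) :=
       match looked with
       | some (x : String × List (String × List String)) => (p, x.2)
       | none => ("hybrid", (pvProfiles.find? (fun x : String × List (String × List String) => x.1 == "hybrid")).elim [] (fun x => x.2))
     (profile,
      row.map (fun kr : String × List String =>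
        (kr.1, PySem.Str.join "," ((kr.2.map (fun s => slots.getD s "")).filter (fun m => m != "")))))) := by
  by_cases hl : p = "local"
  · subst hl
    simp [pvProfiles, pvCsvA, PySem.Dict.ofList, PySem.Dict.update, List.foldl, PySem.Dict.getD_insert, PySem.Dict.getD_empty]
  · by_cases hc : p = "cloud"
    · subst hc
      simp [pvProfiles, pvCsvA, PySem.Dict.ofList, PySem.Dict.update, List.foldl, PySem.Dict.getD_insert, PySem.Dict.getD_empty]
    · by_cases hh : p = "hybrid"
      · subst hh
        simp [pvProfiles, pvCsvA, PySem.Dict.ofList, PySem.Dict.update, List.foldl, PySem.Dict.getD_insert, PySem.Dict.getD_empty]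
      · have h1 : (("local" : String) == p) = false := by simp [Ne.symm hl]
        have h2 : (("cloud" : String) == p) = false := by simp [Ne.symm hc]
        have h3 : (("hybrid" : String) == p) = false := by simp [Ne.symm hh]
        have hp1 : (p == "local") = false := by simp [hl]
        have hp2 : (p == "cloud") = false := by simp [hc]
        simp [pvProfiles, pvCsvA, PySem.Dict.ofList, PySem.Dict.update, List.foldl, PySem.Dict.getD_insert, PySem.Dict.getD_empty,
          List.find?, h1, h2, h3, hp1, hp2]

-- ===== VERDICT (by name: the statement is the Claim_ definition above) =====
theorem apply_minutes_llm_profile_spec : Claim_equal_apply_minutes_llm_profile := by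
  intro env _
  show apply_minutes_llm_profile env = apply_minutes_llm_profile_alt env
  simp only [apply_minutes_llm_profile, apply_minutes_llm_profile_alt]
  exact pv_core _ _ _ _
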